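-- pv_equiv track=rewrite | github.com/EvgeniyLukashevich/PythonImmersion | seminar3_hw/lesson_work/lesson_task1.py | third_solution
-- ===== SOURCE A (Python) =====
-- def third_solution(inner_list: list) -> list:
--     new_list = []
--
--     for i in range(len(inner_list)):
--         is_unique = True
--         for j in range(i + 1, len(inner_list)):
--             if inner_list[i] == inner_list[j]:
--                 is_unique = False
--                 break
--         if is_unique:
--             new_list.append(inner_list[i])
--
--     return new_list
-- ===== SOURCE B (Python) =====
-- def third_solution(inner_list: list) -> list:
--     seen = set()
--     acc = []
--     for x in reversed(inner_list):
--         if x not in seen: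
--             seen.add(x)
--             acc.append(x)
--     return acc[::-1]
-- ===== Notes on version B (the rewrite author's own statement) =====
-- stated objective: faster
-- what changed: Replaces the forward nested 'does the value appear later' scan with a single backward pass over the list keeping a seen-set, then reverses the accumulator.
import Mathlib
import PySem

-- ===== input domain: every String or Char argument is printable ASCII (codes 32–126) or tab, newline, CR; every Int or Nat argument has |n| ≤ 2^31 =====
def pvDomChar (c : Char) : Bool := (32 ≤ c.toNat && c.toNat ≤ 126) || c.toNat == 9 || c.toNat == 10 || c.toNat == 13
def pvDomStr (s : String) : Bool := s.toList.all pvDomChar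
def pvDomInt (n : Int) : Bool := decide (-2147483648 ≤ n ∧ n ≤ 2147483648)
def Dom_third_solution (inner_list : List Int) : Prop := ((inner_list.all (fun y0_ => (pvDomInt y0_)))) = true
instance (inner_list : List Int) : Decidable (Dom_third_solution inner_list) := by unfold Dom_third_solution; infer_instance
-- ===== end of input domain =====

-- B replaces A's O(n^2) forward nested later-occurrence scan by one O(n) backward pass with a seen-set (faster).
-- ===== PORT A =====
-- inner loop 'for j in range(i+1, len)' with break, scanning the elements after position i in order
def tsLater (x : Int) : List Int → Bool
  | [] => true
  | y :: ys => if x == y then false else tsLater x ys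

-- outer loop over the positions, each comparing its element against the rest of the list
def tsOuter : List Int → List Int
  | [] => []
  | x :: xs => (if tsLater x xs then [x] else []) ++ tsOuter xs

def third_solution (inner_list : List Int) : List Int := tsOuter inner_list

-- ===== PORT B =====
-- single backward pass: fold over reversed(inner_list) with (seen set, accumulator), then acc[::-1]
def tsStep (p : PySem.Set Int × List Int) (x : Int) : PySem.Set Int × List Int :=
  if PySem.Set.contains p.1 x then p else (PySem.Set.add p.1 x, p.2 ++ [x])

def third_solution_alt (inner_list : List Int) : List Int :=
  (inner_list.reverse.foldl tsStep (PySem.Set.empty, [])).2.reverse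

-- ===== PRECONDITION & SPEC =====
def Spec_third_solution (inner_list : List Int) (out : List Int) : Prop := out = third_solution_alt inner_list
instance (inner_list : List Int) (out : List Int) : Decidable (Spec_third_solution inner_list out) := by unfold Spec_third_solution; infer_instance

-- ===== CLAIM (what is proved, stated in full; the proofs are below) =====
def Claim_equal_third_solution : Prop := ∀ (inner_list : List Int), Dom_third_solution inner_list → Spec_third_solution inner_list (third_solution inner_list)

-- ===== LEMMAS AND PROOFS =====



-- tsLater x xs is true exactly when x does not occur in xs
theorem tsLater_eq (x : Int) (xs : List Int) : tsLater x xs = decide (x ∉ xs) := by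
  induction xs with
  | nil => simp [tsLater]
  | cons y ys ih => by_cases h : x = y <;> simp [tsLater, h, ih]

-- invariant of B's backward fold: the seen component holds exactly the start set plus the processed elements
theorem tsFold_mem (r : List Int) (s0 : PySem.Set Int) (a0 : List Int) (x : Int) :
    x ∈ (r.foldl tsStep (s0, a0)).1 ↔ (x ∈ s0 ∨ x ∈ r) := by
  induction r generalizing s0 a0 with
  | nil => simp
  | cons y ys ih =>
      simp only [List.foldl_cons, tsStep]
      by_cases h : y ∈ s0
      · rw [if_pos (by simp [PySem.Set.contains, h])]
        rw [ih]; simp only [List.mem_cons]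
        constructor
        · tauto
        · rintro (h1 | rfl | h1) <;> tauto
      · rw [if_neg (by simp [PySem.Set.contains, h])]
        rw [ih]
        simp only [PySem.Set.add, PySem.Set.contains]
        rw [if_neg (by simp [h])]
        simp only [List.mem_append, List.mem_cons]
        tauto

-- B's cons rule: prepending x keeps it iff x does not recur in the rest
theorem alt_cons (x : Int) (xs : List Int) :
    third_solution_alt (x :: xs)
      = if x ∈ xs then third_solution_alt xs else x :: third_solution_alt xs := by
  simp only [third_solution_alt, List.reverse_cons, List.foldl_append, List.foldl_cons,
    List.foldl_nil]
  have h := tsFold_mem xs.reverse PySem.Set.empty [] x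
  simp only [PySem.Set.empty, List.mem_reverse, List.not_mem_nil, false_or] at h
  rw [List.foldl_reverse] at h
  by_cases hc : x ∈ xs
  · rw [show tsStep (List.foldl tsStep (PySem.Set.empty, []) xs.reverse) x
        = List.foldl tsStep (PySem.Set.empty, []) xs.reverse from
      if_pos (by simp [PySem.Set.contains, h, hc])]
    simp [hc]
  · rw [show tsStep (List.foldl tsStep (PySem.Set.empty, []) xs.reverse) x
        = ((List.foldl tsStep (PySem.Set.empty, []) xs.reverse).1.add x,
           (List.foldl tsStep (PySem.Set.empty, []) xs.reverse).2 ++ [x]) from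
      if_neg (by simp [PySem.Set.contains, h, hc])]
    simp [hc]

-- ===== VERDICT (by name: the statement is the Claim_ definition above) =====
theorem third_solution_spec : Claim_equal_third_solution := by
  intro l
  induction l with
  | nil => intro _; rfl
  | cons x xs ih =>
      intro hdom
      have hxs : Dom_third_solution xs := by
        simp only [Dom_third_solution, List.all_cons, Bool.and_eq_true] at hdom ⊢
        exact hdom.2
      have ih' := ih hxs
      unfold Spec_third_solution at ih' ⊢
      simp only [third_solution, tsOuter, tsLater_eq] at ih' ⊢
      rw [alt_cons]
      by_cases hc : x ∈ xs <;> simp [hc, ih']
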